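-- pv_equiv track=rewrite | github.com/jwilner/project_euler | problem_23.py | getNonSumOfAbundantNumbers
-- ===== SOURCE A (Python) =====
-- import math,itertools
--
-- def getProperDivisors(n):
-- 	'''
-- 	this function returns all the proper divisors
-- 	for any given number(e.g. 6: {1,2,3})
-- 	problem23
-- 	'''
-- 	limit = math.floor(math.sqrt(n))
-- 	i = 2
-- 	factors = {1}
-- 	while i <= limit:
-- 		if n % i == 0:
-- 			factors.update([i, n // i])
-- 		i += 1
-- 	return tuple(factors)
--
-- def getNonSumOfAbundantNumbers(max):
-- 	'''
-- 	takes a max and returns a list of all numbers not equal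
-- 	to the sum of any two abundant numbers
-- 	problem23
-- 	'''
-- 	abundant = []
-- 	i = 0
-- 	while i < max:
-- 		i += 1
-- 		factors = getProperDivisors(i)
-- 		if sum(factors) > i:
-- 			abundant.append(i)
--
-- 	pairs = itertools.product(abundant,abundant)
--
-- 	sieve = {d:0 for d in range(1,max+1)}
-- 	for p in pairs:
-- 		paired = sum(p)
-- 		if paired <= max:
-- 			sieve[paired] = 1
-- 	return [i for (i,val) in sieve.items() if val == 0]
-- ===== SOURCE B (Python) =====
-- import math
--
-- def getProperDivisors(n):
--     limit = math.floor(math.sqrt(n))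
--     i = 2
--     factors = {1}
--     while i <= limit:
--         if n % i == 0:
--             factors.update([i, n // i])
--         i += 1
--     return tuple(factors)
--
-- def getNonSumOfAbundantNumbers(max):
--     # One ascending pass: keep the abundant numbers seen so far in a set and
--     # test each candidate n directly for a decomposition n = a + (n - a),
--     # instead of enumerating all ordered pairs into a sieve dict.
--     abundant = []
--     abset = set()
--     result = []
--     n = 0
--     while n < max:
--         n += 1
--         if sum(getProperDivisors(n)) > n:
--             abundant.append(n)
--             abset.add(n)
--         if not any((n - a) in abset for a in abundant):
--             result.append(n)
--     return result
-- ===== Notes on version B (the rewrite author's own statement) =====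
-- stated objective: faster
-- what changed: Instead of enumerating all ordered pairs of abundant numbers and marking their sums in a dict sieve, B makes one ascending pass that keeps the abundant numbers seen so far in a set and tests each candidate n directly for a decomposition n = a + (n - a), stopping at the first hit.
import Mathlib
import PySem

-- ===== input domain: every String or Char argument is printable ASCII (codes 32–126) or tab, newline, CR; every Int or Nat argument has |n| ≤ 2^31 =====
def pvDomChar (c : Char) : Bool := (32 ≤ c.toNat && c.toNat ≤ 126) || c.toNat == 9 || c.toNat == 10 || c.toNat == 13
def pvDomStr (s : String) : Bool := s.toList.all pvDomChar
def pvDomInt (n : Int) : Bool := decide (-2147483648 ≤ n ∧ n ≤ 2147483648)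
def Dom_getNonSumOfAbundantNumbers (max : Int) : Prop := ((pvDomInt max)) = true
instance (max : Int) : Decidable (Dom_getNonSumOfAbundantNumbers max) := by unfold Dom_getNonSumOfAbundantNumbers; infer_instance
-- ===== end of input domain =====

-- B replaces A's all-ordered-pairs marking sieve by one ascending pass that tests
-- each candidate n for a decomposition n = a + (n - a) against a membership set
-- of the abundant numbers seen so far (alternative algorithm; measured faster).

-- ===== PORT A =====
-- getProperDivisors (the helper both Source A and Source B contain verbatim);
-- math.floor(math.sqrt(n)) is ported as the exact integer square root
-- (every call in either program has n ≥ 1, where the float sqrt is exact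
-- on the admitted |n| ≤ 2^31 domain).
def pvProperDivisors (n : Int) : PySem.Set Int :=
  let limit : Int := Int.ofNat (Nat.sqrt n.toNat)
  (PySem.List.pyRange 2 (limit + 1)).foldl
    (fun factors i =>
      if PySem.Int.mod n i == 0 then
        PySem.Set.update factors [i, PySem.Int.floordiv n i]
      else factors)
    (PySem.Set.ofList [1])


-- `sum(getProperDivisors(i)) > i` (summing a Python set is order-independent)
def pvIsAbundant (i : Int) : Bool := decide ((pvProperDivisors i).sum > i)


def getNonSumOfAbundantNumbers (max : Int) : List Int :=
  let abundant := (PySem.List.pyRange 1 (max + 1)).foldl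
    (fun acc i => if pvIsAbundant i then acc ++ [i] else acc) []
  let sieve0 : PySem.Dict Int Int :=
    (PySem.List.pyRange 1 (max + 1)).foldl (fun d k => d.insert k 0) PySem.Dict.empty
  let sieve := abundant.foldl (fun d a =>
    abundant.foldl (fun d b => if a + b ≤ max then d.insert (a + b) 1 else d) d) sieve0
  (sieve.items.filter (fun p => p.2 == 0)).map (fun p => p.1)


-- ===== PORT B =====
-- fold state: (abundant list, abundant set, result list)
def getNonSumOfAbundantNumbers_alt (max : Int) : List Int :=
  let st := (PySem.List.pyRange 1 (max + 1)).foldl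
    (fun st n =>
      let st1 :=
        if pvIsAbundant n then (st.1 ++ [n], PySem.Set.add st.2.1 n, st.2.2)
        else st
      if st1.1.any (fun a => PySem.Set.contains st1.2.1 (n - a)) then st1
      else (st1.1, st1.2.1, st1.2.2 ++ [n]))
    (([] : List Int), (PySem.Set.empty : PySem.Set Int), ([] : List Int))
  st.2.2


-- ===== PRECONDITION & SPEC =====
def Spec_getNonSumOfAbundantNumbers (max : Int) (out : List Int) : Prop := out = getNonSumOfAbundantNumbers_alt max
instance (max : Int) (out : List Int) : Decidable (Spec_getNonSumOfAbundantNumbers max out) := by unfold Spec_getNonSumOfAbundantNumbers; infer_instance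

-- ===== CLAIM (what is proved, stated in full; the proofs are below) =====
def Claim_equal_getNonSumOfAbundantNumbers : Prop := ∀ (max : Int), Dom_getNonSumOfAbundantNumbers max → Spec_getNonSumOfAbundantNumbers max (getNonSumOfAbundantNumbers max)

-- ===== LEMMAS AND PROOFS =====

-- `n is a sum of two abundant numbers (both necessarily ≥ 1, hence < n)`
def pvHasDecomp (n : Int) : Bool :=
  (PySem.List.pyRange 1 n).any (fun a => pvIsAbundant a && pvIsAbundant (n - a))


def pvF (t : Int) : List Int := (PySem.List.pyRange 1 t).filter pvIsAbundant

def pvG (t : Int) : List Int := (PySem.List.pyRange 1 t).filter (fun n => !pvHasDecomp n)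


theorem pv_mem_F (t x : Int) :
    x ∈ pvF t ↔ pvIsAbundant x = true ∧ 1 ≤ x ∧ x < t := by
  simp [pvF, List.mem_filter, PySem.List.mem_pyRange_one, and_comm]


theorem pv_test_eq (n : Int) :
    ((pvF (n + 1)).any (fun a => PySem.Set.contains (pvF (n + 1)) (n - a)))
    = pvHasDecomp n := by
  rw [Bool.eq_iff_iff]
  simp only [List.any_eq_true, PySem.Set.contains_eq_listContains, List.contains_iff_mem,
    pv_mem_F, pvHasDecomp, PySem.List.mem_pyRange_one, Bool.and_eq_true]
  constructor
  · rintro ⟨a, ⟨ha, ha1, han⟩, hb, hb1, hbn⟩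
    exact ⟨a, ⟨ha1, by omega⟩, ha, hb⟩
  · rintro ⟨a, ⟨ha1, han⟩, ha, hb⟩
    exact ⟨a, ⟨ha, ha1, by omega⟩, hb, by omega, by omega⟩


theorem pv_step (n : Int) (h1 : 1 ≤ n) :
    ((fun (st : List Int × PySem.Set Int × List Int) (n : Int) =>
      let st1 :=
        if pvIsAbundant n then (st.1 ++ [n], PySem.Set.add st.2.1 n, st.2.2)
        else st
      if st1.1.any (fun a => PySem.Set.contains st1.2.1 (n - a)) then st1
      else (st1.1, st1.2.1, st1.2.2 ++ [n])) (pvF n, pvF n, pvG n) n)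
    = (pvF (n + 1), pvF (n + 1), pvG (n + 1)) := by
  have hr : PySem.List.pyRange 1 (n + 1) = PySem.List.pyRange 1 n ++ [n] :=
    PySem.List.pyRange_one_succ_right h1
  have hnotmem : n ∉ pvF n := by
    intro h
    have := (pv_mem_F n n).mp h
    omega
  have hG : pvG (n + 1) = pvG n ++ if pvHasDecomp n then [] else [n] := by
    by_cases hd : pvHasDecomp n <;> simp [pvG, hr, List.filter_append, hd]
  by_cases hab : pvIsAbundant n
  · have hadd : PySem.Set.add (pvF n) n = pvF n ++ [n] := PySem.Set.add_of_not_mem hnotmem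
    have hF1 : pvF (n + 1) = pvF n ++ [n] := by
      simp [pvF, hr, List.filter_append, hab]
    simp only [if_pos hab, hadd]
    rw [← hF1, pv_test_eq n]
    by_cases hd : pvHasDecomp n <;> simp [hd, hG]
  · have hF1 : pvF (n + 1) = pvF n := by
      simp [pvF, hr, List.filter_append, hab]
    simp only [if_neg hab]
    rw [← hF1, pv_test_eq n]
    by_cases hd : pvHasDecomp n <;> simp [hd, hG]


theorem pv_bfold (k : Nat) :
    ((PySem.List.pyRange 1 ((k : Int) + 1)).foldl
      (fun st n =>
        let st1 :=
          if pvIsAbundant n then (st.1 ++ [n], PySem.Set.add st.2.1 n, st.2.2)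
          else st
        if st1.1.any (fun a => PySem.Set.contains st1.2.1 (n - a)) then st1
        else (st1.1, st1.2.1, st1.2.2 ++ [n]))
      (([] : List Int), (PySem.Set.empty : PySem.Set Int), ([] : List Int)))
    = (pvF ((k : Int) + 1), pvF ((k : Int) + 1), pvG ((k : Int) + 1)) := by
  induction k with
  | zero =>
      rw [show ((0 : Nat) : Int) + 1 = 1 by norm_num,
        PySem.List.pyRange_one_eq_nil (by omega : (1:Int) ≤ 1)]
      simp [pvF, pvG, PySem.List.pyRange_one_eq_nil (by omega : (1:Int) ≤ 1)]
  | succ k ih =>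
      have hn : (1 : Int) ≤ (k : Int) + 1 := by omega
      rw [show (((k + 1 : Nat)) : Int) + 1 = ((k : Int) + 1) + 1 by push_cast; ring,
        PySem.List.pyRange_one_succ_right hn, List.foldl_append, ih]
      simp only [List.foldl_cons, List.foldl_nil]
      exact pv_step ((k : Int) + 1) hn


theorem pv_mark_inner (M a n : Int) (bs : List Int) (d : PySem.Dict Int Int) :
    (bs.foldl (fun d b => if a + b ≤ M then d.insert (a + b) 1 else d) d).getD n 0
    = if ∃ b ∈ bs, a + b = n ∧ a + b ≤ M then (1 : Int) else d.getD n 0 := by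
  induction bs generalizing d with
  | nil => simp
  | cons b bs ih =>
      simp only [List.foldl_cons]
      rw [ih]
      by_cases hb : a + b ≤ M
      · simp only [if_pos hb, PySem.Dict.getD_insert, List.exists_mem_cons_iff]
        by_cases h1 : ∃ x ∈ bs, a + x = n ∧ a + x ≤ M
        · simp [h1]
        · simp only [if_neg h1]
          by_cases h2 : n = a + b
          · rw [if_pos h2, if_pos (Or.inl ⟨by omega, hb⟩)]
          · rw [if_neg h2, if_neg ?_]
            rintro (⟨h, _⟩ | h)
            · omega
            · exact h1 h
      · simp only [if_neg hb, List.exists_mem_cons_iff]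
        have hnb : ¬(a + b = n ∧ a + b ≤ M) := fun h => hb h.2
        simp [hnb]


theorem pv_keys_inner (M a : Int) (bs : List Int) (d : PySem.Dict Int Int)
    (h : ∀ b ∈ bs, a + b ≤ M → d.contains (a + b) = true) :
    (bs.foldl (fun d b => if a + b ≤ M then d.insert (a + b) 1 else d) d).keys = d.keys := by
  induction bs generalizing d with
  | nil => rfl
  | cons b bs ih =>
      simp only [List.foldl_cons]
      by_cases hb : a + b ≤ M
      · rw [if_pos hb, ih, PySem.Dict.keys_insert_of_contains _ _ (h b List.mem_cons_self hb)]
        intro b' hb' hle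
        rw [PySem.Dict.contains_insert]
        simp [h b' (List.mem_cons_of_mem _ hb') hle]
      · rw [if_neg hb, ih]
        intro b' hb' hle
        exact h b' (List.mem_cons_of_mem _ hb') hle


theorem pv_keys_outer (M : Int) (as bs : List Int) (d : PySem.Dict Int Int)
    (h : ∀ a ∈ as, ∀ b ∈ bs, a + b ≤ M → d.contains (a + b) = true) :
    (as.foldl (fun d a => bs.foldl (fun d b => if a + b ≤ M then d.insert (a + b) 1 else d) d) d).keys = d.keys := by
  induction as generalizing d with
  | nil => rfl
  | cons a as ih =>
      simp only [List.foldl_cons]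
      have hk : (bs.foldl (fun d b => if a + b ≤ M then d.insert (a + b) 1 else d) d).keys = d.keys :=
        pv_keys_inner M a bs d (h a List.mem_cons_self)
      rw [ih, hk]
      intro a' ha' b' hb' hle
      rw [PySem.Dict.contains_iff_mem_keys, hk, ← PySem.Dict.contains_iff_mem_keys]
      exact h a' (List.mem_cons_of_mem _ ha') b' hb' hle


theorem pv_mark_outer (M n : Int) (as bs : List Int) (d : PySem.Dict Int Int) :
    ((as.foldl (fun d a => bs.foldl (fun d b => if a + b ≤ M then d.insert (a + b) 1 else d) d) d).getD n 0)
    = if ∃ a ∈ as, ∃ b ∈ bs, a + b = n ∧ a + b ≤ M then (1 : Int) else d.getD n 0 := by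
  induction as generalizing d with
  | nil => simp
  | cons a as ih =>
      simp only [List.foldl_cons]
      rw [ih, pv_mark_inner]
      simp only [List.exists_mem_cons_iff]
      by_cases h0 : ∃ b ∈ bs, a + b = n ∧ a + b ≤ M
      · simp [h0]
      · by_cases h1 : ∃ x ∈ as, ∃ b ∈ bs, x + b = n ∧ x + b ≤ M
        · simp [h0, h1]
        · simp [h0, h1]


theorem pv_sieve0_items (M : Int) :
    ((PySem.List.pyRange 1 (M + 1)).foldl (fun d k => d.insert k (0 : Int)) PySem.Dict.empty).items
    = (PySem.List.pyRange 1 (M + 1)).map (fun k => (k, (0 : Int))) := by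
  have h := PySem.Dict.items_foldl_insert_fresh (PySem.List.pyRange 1 (M + 1))
    (fun k => k) (fun _ => (0 : Int)) PySem.Dict.empty
    (fun a _ => PySem.Dict.contains_empty a)
    (by simpa using PySem.List.nodup_pyRange_one 1 (M + 1))
  simpa using h


theorem pv_sieve0_keys (M : Int) :
    ((PySem.List.pyRange 1 (M + 1)).foldl (fun d k => d.insert k (0 : Int)) PySem.Dict.empty).keys
    = PySem.List.pyRange 1 (M + 1) := by
  simp only [PySem.Dict.keys, pv_sieve0_items, List.map_map]
  exact (List.map_congr_left (fun k _ => rfl)).trans (List.map_id' _)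


theorem pv_sieve0_getD (M n : Int) :
    ((PySem.List.pyRange 1 (M + 1)).foldl (fun d k => d.insert k (0 : Int)) PySem.Dict.empty).getD n 0
    = 0 := by
  by_cases hc : ((PySem.List.pyRange 1 (M + 1)).foldl (fun d k => d.insert k (0 : Int)) PySem.Dict.empty).contains n
  · have hk := (PySem.Dict.contains_iff_mem_keys _ _).mp hc
    rw [pv_sieve0_keys] at hk
    refine PySem.Dict.getD_of_mem_items _ ?_ ?_ 0
    · rw [pv_sieve0_items]
      exact List.mem_map_of_mem hk
    · rw [pv_sieve0_keys]
      exact PySem.List.nodup_pyRange_one 1 (M + 1)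
  · exact PySem.Dict.getD_of_not_contains _ _ (by simpa using hc)


theorem pv_marked_iff (M n : Int) (h2 : n ≤ M) :
    (∃ a ∈ pvF (M + 1), ∃ b ∈ pvF (M + 1), a + b = n ∧ a + b ≤ M) ↔ pvHasDecomp n = true := by
  simp only [pv_mem_F, pvHasDecomp, List.any_eq_true, PySem.List.mem_pyRange_one, Bool.and_eq_true]
  constructor
  · rintro ⟨a, ⟨ha, ha1, haM⟩, b, ⟨hb, hb1, hbM⟩, heq, hle⟩
    refine ⟨a, ⟨ha1, by omega⟩, ha, ?_⟩
    rw [show n - a = b by omega]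
    exact hb
  · rintro ⟨a, ⟨ha1, han⟩, ha, hb⟩
    exact ⟨a, ⟨ha, ha1, by omega⟩, n - a, ⟨hb, by omega, by omega⟩, by ring, by omega⟩


def pvMarked (M n : Int) : Bool :=
  (pvF (M + 1)).any (fun a => (pvF (M + 1)).any (fun b => a + b == n && decide (a + b ≤ M)))


theorem pvMarked_iff (M n : Int) :
    pvMarked M n = true ↔ ∃ a ∈ pvF (M + 1), ∃ b ∈ pvF (M + 1), a + b = n ∧ a + b ≤ M := by
  simp [pvMarked, List.any_eq_true]


theorem pv_sv_getD (M n : Int) :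
    (((pvF (M + 1)).foldl (fun d a =>
        (pvF (M + 1)).foldl (fun d b => if a + b ≤ M then d.insert (a + b) 1 else d) d)
      ((PySem.List.pyRange 1 (M + 1)).foldl (fun d k => d.insert k (0 : Int)) PySem.Dict.empty)).getD n 0)
    = if pvMarked M n then (1 : Int) else 0 := by
  rw [pv_mark_outer, pv_sieve0_getD]
  by_cases h : ∃ a ∈ pvF (M + 1), ∃ b ∈ pvF (M + 1), a + b = n ∧ a + b ≤ M
  · rw [if_pos h, if_pos ((pvMarked_iff M n).mpr h)]
  · rw [if_neg h, if_neg (fun hm => h ((pvMarked_iff M n).mp hm))]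


theorem pv_sv_keys (M : Int) :
    (((pvF (M + 1)).foldl (fun d a =>
        (pvF (M + 1)).foldl (fun d b => if a + b ≤ M then d.insert (a + b) 1 else d) d)
      ((PySem.List.pyRange 1 (M + 1)).foldl (fun d k => d.insert k (0 : Int)) PySem.Dict.empty)).keys)
    = PySem.List.pyRange 1 (M + 1) := by
  rw [pv_keys_outer, pv_sieve0_keys]
  intro a ha b hb hle
  rw [PySem.Dict.contains_iff_mem_keys, pv_sieve0_keys, PySem.List.mem_pyRange_one]
  have := (pv_mem_F (M + 1) a).mp ha
  have := (pv_mem_F (M + 1) b).mp hb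
  omega


theorem pv_marked_iff' (M n : Int) (h2 : n ≤ M) :
    pvMarked M n = pvHasDecomp n := by
  rw [Bool.eq_iff_iff, pvMarked_iff]
  exact pv_marked_iff M n h2


theorem pv_a_eq_canon (M : Int) : getNonSumOfAbundantNumbers M = pvG (M + 1) := by
  unfold getNonSumOfAbundantNumbers
  simp only [PySem.List.foldl_append_if pvIsAbundant (fun i => i), List.nil_append, List.map_id']
  have habf : List.filter pvIsAbundant (PySem.List.pyRange 1 (M + 1)) = pvF (M + 1) := rfl
  rw [habf]
  have hkeys := pv_sv_keys M
  have hnd : (((pvF (M + 1)).foldl (fun d a =>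
        (pvF (M + 1)).foldl (fun d b => if a + b ≤ M then d.insert (a + b) 1 else d) d)
      ((PySem.List.pyRange 1 (M + 1)).foldl (fun d k => d.insert k (0 : Int)) PySem.Dict.empty)).keys).Nodup := by
    rw [hkeys]; exact PySem.List.nodup_pyRange_one 1 (M + 1)
  rw [PySem.Dict.items_eq_map_keys _ hnd 0, hkeys]
  have hitems : (PySem.List.pyRange 1 (M + 1)).map (fun k =>
      (k, (((pvF (M + 1)).foldl (fun d a =>
        (pvF (M + 1)).foldl (fun d b => if a + b ≤ M then d.insert (a + b) 1 else d) d)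
      ((PySem.List.pyRange 1 (M + 1)).foldl (fun d k => d.insert k (0 : Int)) PySem.Dict.empty)).getD k 0)))
      = (PySem.List.pyRange 1 (M + 1)).map (fun k => (k, if pvMarked M k then (1 : Int) else 0)) :=
    List.map_congr_left (fun k _ => by rw [pv_sv_getD])
  rw [hitems, List.filter_map, List.map_map]
  have hpred : ∀ k ∈ PySem.List.pyRange 1 (M + 1),
      (((fun p : Int × Int => p.2 == 0) ∘ (fun k => (k, if pvMarked M k then (1 : Int) else 0))) k)
      = (!pvHasDecomp k) := by
    intro k hk
    obtain ⟨hk1, hk2⟩ := PySem.List.mem_pyRange_one.mp hk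
    rw [Function.comp_apply, pv_marked_iff' M k (by omega)]
    by_cases hd : pvHasDecomp k <;> simp [hd]
  rw [List.filter_congr hpred]
  exact (List.map_congr_left (fun k _ => rfl)).trans (List.map_id' _)


theorem pv_b_eq_canon (M : Int) : getNonSumOfAbundantNumbers_alt M = pvG (M + 1) := by
  unfold getNonSumOfAbundantNumbers_alt
  by_cases hM : 0 ≤ M
  · obtain ⟨k, rfl⟩ : ∃ k : Nat, M = (k : Int) := ⟨M.toNat, (Int.toNat_of_nonneg hM).symm⟩
    rw [pv_bfold k]
  · rw [PySem.List.pyRange_one_eq_nil (by omega : M + 1 ≤ 1)]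
    simp [pvG, PySem.List.pyRange_one_eq_nil (by omega : M + 1 ≤ 1)]

-- ===== VERDICT (by name: the statement is the Claim_ definition above) =====
theorem getNonSumOfAbundantNumbers_spec : Claim_equal_getNonSumOfAbundantNumbers := by
  intro max _
  unfold Spec_getNonSumOfAbundantNumbers
  rw [pv_a_eq_canon, pv_b_eq_canon]
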